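-- pv_equiv track=rewrite | github.com/toomzheng/dsc20 | labs/lab02.py | time_for_food
-- ===== SOURCE A (Python) =====
-- def time_for_food(choices):
--     """
--     Returns a list with capitalized names with preferred time that is
--     either 'A' or 'M'.
--     Start from empty list and return immediately if a time that is not
--     'A' or 'M' is found.
--     --
--     Parameters:
--         choices: a list of lists of the form [<str>, <str>], with name
--             and time
--     --
--     Returns:
--         A new list with the name(s) capitalized
--
--     >>> choices = [["Marina", "A"], ["Jessica", "M"], ["Anish", "M"]]
--     >>> time_for_food(choices)
--     ['MARINA', 'JESSICA', 'ANISH']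
--     >>> choices = [["Batman", "A"], ["James", "m"], \
--     ["Jay Gatsby", "O"]]
--     >>> time_for_food(choices)
--     ['BATMAN']
--     >>> choices = [["James", "O"], ["Marina", "A"], ["Bond", "M"]]
--     >>> time_for_food(choices)
--     []
--     """
--     i=0
--     j=1
--     new_choices = []
--     while i<len(choices):
--         if choices[i][j] == "A" or choices[i][j] == "M":
--             new_choices.append(choices[i][0].upper())
--             i+=1
--         else:
--             break
--     return new_choices
-- ===== SOURCE B (Python) =====
-- def time_for_food(choices):
--     cutoff = len(choices)
--     for k, row in enumerate(choices):
--         if row[1] != "A" and row[1] != "M":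
--             cutoff = k
--             break
--     return [row[0].upper() for row in choices[:cutoff]]
-- ===== Notes on version B (the rewrite author's own statement) =====
-- stated objective: alternative
-- what changed: Replaces the interleaved while-loop that appends-and-breaks with two separate phases: first find the cutoff index (first row whose time is not 'A'/'M'), then map upper over the prefix choices[:cutoff].
import Mathlib
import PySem

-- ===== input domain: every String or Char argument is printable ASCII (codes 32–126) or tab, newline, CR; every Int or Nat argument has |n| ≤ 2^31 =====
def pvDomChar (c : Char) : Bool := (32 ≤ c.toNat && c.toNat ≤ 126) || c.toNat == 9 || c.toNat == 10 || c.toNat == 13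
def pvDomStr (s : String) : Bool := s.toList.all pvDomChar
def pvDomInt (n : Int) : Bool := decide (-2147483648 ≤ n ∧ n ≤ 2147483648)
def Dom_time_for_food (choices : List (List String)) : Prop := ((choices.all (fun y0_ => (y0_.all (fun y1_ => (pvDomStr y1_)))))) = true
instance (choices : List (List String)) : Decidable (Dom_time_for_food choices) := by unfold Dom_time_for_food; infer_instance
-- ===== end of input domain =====

-- B splits A's interleaved append-and-break while-loop into a cutoff-finding scan plus a map over the prefix; same cost, different decomposition.

-- ===== PORT A =====
-- while i < len(choices): test choices[i][1]; append choices[i][0].upper() or break.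
-- Ported as structural recursion over the remaining rows with the accumulator new_choices;
-- pyGet? row 1 = none is an IndexError (excluded by Pre_), the loop result there is unconstrained (we stop).
def time_for_food_loop (rest : List (List String)) (acc : List String) : List String :=
  match rest with
  | [] => acc
  | row :: rs =>
    match PySem.List.pyGet? row 1 with
    | some t =>
      if t = "A" ∨ t = "M" then
        time_for_food_loop rs (acc ++ [PySem.Str.upper ((PySem.List.pyGet? row 0).getD "")])
      else acc
    | none => acc

def time_for_food (choices : List (List String)) : List String :=
  time_for_food_loop choices []

-- ===== PORT B =====
-- phase 1: index of the first row whose time is not 'A'/'M' (whole length if none; stops at the first failure)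
def time_for_food_cutoff (rest : List (List String)) : Nat :=
  match rest with
  | [] => 0
  | row :: rs =>
    match PySem.List.pyGet? row 1 with
    | some t => if t ≠ "A" ∧ t ≠ "M" then 0 else 1 + time_for_food_cutoff rs
    | none => 0

-- phase 2: [row[0].upper() for row in choices[:cutoff]]
def time_for_food_alt (choices : List (List String)) : List String :=
  (choices.take (time_for_food_cutoff choices)).map
    (fun row => PySem.Str.upper ((PySem.List.pyGet? row 0).getD ""))

-- ===== PRECONDITION & SPEC =====
-- Pre_: every row the Python scan actually reaches (all earlier rows pass the 'A'/'M' test) has at least 2 entries;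
-- otherwise choices[i][1] raises IndexError in both A and B.
def Pre_time_for_food (choices : List (List String)) : Prop :=
  ∀ i : Nat, (h : i < choices.length) →
    (∀ j : Nat, (hj : j < i) → PySem.List.pyGet? (choices[j]'(Nat.lt_trans hj h)) 1 = some "A" ∨
        PySem.List.pyGet? (choices[j]'(Nat.lt_trans hj h)) 1 = some "M") →
    2 ≤ (choices[i]'h).length
instance (choices : List (List String)) : Decidable (Pre_time_for_food choices) := by
  unfold Pre_time_for_food; infer_instance

def pvWitness_time_for_food : List (List String) := [["Marina", "A"], ["Jessica", "M"], ["Bond", "O"]]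

def Spec_time_for_food (choices : List (List String)) (out : List String) : Prop := out = time_for_food_alt choices
instance (choices : List (List String)) (out : List String) : Decidable (Spec_time_for_food choices out) := by unfold Spec_time_for_food; infer_instance

-- ===== CLAIM (what is proved, stated in full; the proofs are below) =====
def Claim_equal_time_for_food : Prop := ∀ (choices : List (List String)), Dom_time_for_food choices → Pre_time_for_food choices → Spec_time_for_food choices (time_for_food choices)

-- ===== LEMMAS AND PROOFS =====
lemma time_for_food_loop_eq (rest : List (List String)) :
    ∀ acc : List String,
      time_for_food_loop rest acc =
        acc ++ (rest.take (time_for_food_cutoff rest)).map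
          (fun row => PySem.Str.upper ((PySem.List.pyGet? row 0).getD "")) := by
  induction rest with
  | nil => intro acc; simp [time_for_food_loop, time_for_food_cutoff]
  | cons row rs ih =>
    intro acc
    rw [time_for_food_loop, time_for_food_cutoff]
    cases hg : PySem.List.pyGet? row 1 with
    | none => simp
    | some t =>
      by_cases h : t = "A" ∨ t = "M"
      · have hne : ¬ (t ≠ "A" ∧ t ≠ "M") := by tauto
        simp only [h, if_pos, hne, if_neg, not_false_eq_true]
        rw [ih]
        simp [Nat.add_comm 1 (time_for_food_cutoff rs), List.take_succ_cons]
      · have hne : t ≠ "A" ∧ t ≠ "M" := by tauto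
        simp [hne]

-- ===== VERDICT (by name: the statement is the Claim_ definition above) =====
theorem time_for_food_spec : Claim_equal_time_for_food := by
  intro choices _ _
  unfold Spec_time_for_food time_for_food time_for_food_alt
  simpa using time_for_food_loop_eq choices []
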